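-- pv_equiv track=rewrite | github.com/kopakama/- | задача2/main.py | turnChordsIntoTab
-- ===== SOURCE A (Python) =====
-- def turnChordsIntoTab(chords):
--     # кладем кждый элемент в массив
--     chordsArray = chords.split(' ')
--     # начало табулатуры
--     note_e = 'e|---'
--     note_B = 'B|---'
--     note_G = 'G|---'
--     note_D = 'D|---'
--     note_A = 'A|---'
--     note_E = 'E|---'
--     chord = ''
--
--     # расписываем аккорды
--     for i in range(len(chordsArray)):
--         if chordsArray[i] == 'Am':
--             note_e += '0---'
--             note_B += '1---'
--             note_G += '2---'
--             note_D += '2---'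
--             note_A += '0---'
--             note_E += '----'
--             chord += 'Am  '
--
--         if (chordsArray[i] == 'C'):
--             note_e += '0---'
--             note_B += '1---'
--             note_G += '0---'
--             note_D += '2---'
--             note_A += '3---'
--             note_E += '----'
--             chord += 'C   '
--
--         if (chordsArray[i] == 'D'):
--             note_e += '2---'
--             note_B += '3---'
--             note_G += '2---'
--             note_D += '0---'
--             note_A += '----'
--             note_E += '----'
--             chord += 'D   '
--
--         if (chordsArray[i] == 'G'):
--             note_e += '3---'
--             note_B += '0---'
--             note_G += '0---'
--             note_D += '0---'
--             note_A += '2---'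
--             note_E += '3---'
--             chord += 'G   '
--
--     # конец табулатуры
--     note_e += '|\n'
--     note_B += '|\n'
--     note_G += '|\n'
--     note_D += '|\n'
--     note_A += '|\n'
--     note_E += '|\n'
--
--     # возвращаем построенную табулатуру
--     return note_e + note_B + note_G + note_D + note_A + note_E + '     ' + chord.strip()
-- ===== SOURCE B (Python) =====
-- TAB = {
--     'Am': ('0---', '1---', '2---', '2---', '0---', '----', 'Am  '),
--     'C':  ('0---', '1---', '0---', '2---', '3---', '----', 'C   '),
--     'D':  ('2---', '3---', '2---', '0---', '----', '----', 'D   '),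
--     'G':  ('3---', '0---', '0---', '0---', '2---', '3---', 'G   '),
-- }
--
-- def turnChordsIntoTab(chords):
--     toks = [TAB[t] for t in chords.split(' ') if t in TAB]
--     rows = []
--     for i, pre in enumerate('eBGDAE'):
--         rows.append(pre + '|---' + ''.join(f[i] for f in toks) + '|\n')
--     return ''.join(rows) + '     ' + ''.join(f[6] for f in toks).strip()
-- ===== Notes on version B (the rewrite author's own statement) =====
-- stated objective: simpler
-- what changed: Replaced the seven running string accumulators updated by four sequential if-branches inside an index loop with a chord->fragments table looked up once per token, a filterMap to the recognized entries, and a transposed loop that builds each of the six rows (and the label line) by joining that row's fragment across the recognized chords.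
import Mathlib
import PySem

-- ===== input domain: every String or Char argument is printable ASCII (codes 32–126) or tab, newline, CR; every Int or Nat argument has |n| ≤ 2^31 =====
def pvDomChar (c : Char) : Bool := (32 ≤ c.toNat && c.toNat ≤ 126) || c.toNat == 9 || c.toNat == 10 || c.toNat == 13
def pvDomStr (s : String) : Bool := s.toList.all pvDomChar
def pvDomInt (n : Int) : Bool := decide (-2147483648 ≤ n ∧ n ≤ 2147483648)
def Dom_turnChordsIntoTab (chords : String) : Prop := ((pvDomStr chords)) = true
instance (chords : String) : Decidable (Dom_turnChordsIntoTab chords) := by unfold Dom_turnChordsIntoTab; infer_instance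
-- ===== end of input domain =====

-- B replaces A's seven running accumulators and four if-branches with a chord->fragments table and a transposed row-building loop (simpler decomposition, same cost).
-- ===== PORT A =====
-- loop body of A: the four sequential if-branches updating the seven accumulated strings
def pvAStep (st : List Char × List Char × List Char × List Char × List Char × List Char × List Char)
    (c : List Char) : List Char × List Char × List Char × List Char × List Char × List Char × List Char :=
  let st := if c = "Am".toList then (st.1 ++ "0---".toList, st.2.1 ++ "1---".toList, st.2.2.1 ++ "2---".toList,
      st.2.2.2.1 ++ "2---".toList, st.2.2.2.2.1 ++ "0---".toList, st.2.2.2.2.2.1 ++ "----".toList,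
      st.2.2.2.2.2.2 ++ "Am  ".toList) else st
  let st := if c = "C".toList then (st.1 ++ "0---".toList, st.2.1 ++ "1---".toList, st.2.2.1 ++ "0---".toList,
      st.2.2.2.1 ++ "2---".toList, st.2.2.2.2.1 ++ "3---".toList, st.2.2.2.2.2.1 ++ "----".toList,
      st.2.2.2.2.2.2 ++ "C   ".toList) else st
  let st := if c = "D".toList then (st.1 ++ "2---".toList, st.2.1 ++ "3---".toList, st.2.2.1 ++ "2---".toList,
      st.2.2.2.1 ++ "0---".toList, st.2.2.2.2.1 ++ "----".toList, st.2.2.2.2.2.1 ++ "----".toList,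
      st.2.2.2.2.2.2 ++ "D   ".toList) else st
  let st := if c = "G".toList then (st.1 ++ "3---".toList, st.2.1 ++ "0---".toList, st.2.2.1 ++ "0---".toList,
      st.2.2.2.1 ++ "0---".toList, st.2.2.2.2.1 ++ "2---".toList, st.2.2.2.2.2.1 ++ "3---".toList,
      st.2.2.2.2.2.2 ++ "G   ".toList) else st
  st

def turnChordsIntoTab (chords : String) : String :=
  let chordsArray := PySem.Chars.splitOn chords.toList " ".toList
  let st := (PySem.List.pyRange 0 (PySem.List.len chordsArray) 1).foldl
    (fun st i => pvAStep st (PySem.List.pyGetD chordsArray i []))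
    ("e|---".toList, "B|---".toList, "G|---".toList, "D|---".toList, "A|---".toList, "E|---".toList, ([] : List Char))
  String.ofList (st.1 ++ "|\n".toList ++ st.2.1 ++ "|\n".toList ++ st.2.2.1 ++ "|\n".toList ++
    st.2.2.2.1 ++ "|\n".toList ++ st.2.2.2.2.1 ++ "|\n".toList ++ st.2.2.2.2.2.1 ++ "|\n".toList ++
    "     ".toList ++ PySem.Chars.strip st.2.2.2.2.2.2)

-- ===== PORT B =====
-- the TAB dict of Source B: the six 4-char tab fragments plus the 4-wide label, per chord
def pvTAB : PySem.Dict (List Char) (List (List Char)) :=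
  PySem.Dict.ofList
  [("Am".toList, ["0---".toList, "1---".toList, "2---".toList, "2---".toList, "0---".toList, "----".toList, "Am  ".toList]),
   ("C".toList,  ["0---".toList, "1---".toList, "0---".toList, "2---".toList, "3---".toList, "----".toList, "C   ".toList]),
   ("D".toList,  ["2---".toList, "3---".toList, "2---".toList, "0---".toList, "----".toList, "----".toList, "D   ".toList]),
   ("G".toList,  ["3---".toList, "0---".toList, "0---".toList, "0---".toList, "2---".toList, "3---".toList, "G   ".toList])]

def turnChordsIntoTab_alt (chords : String) : String :=
  let toks := (PySem.Chars.splitOn chords.toList " ".toList).filterMap (fun t => PySem.Dict.get? pvTAB t)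
  let rows := (PySem.List.enumerate "eBGDAE".toList).map
    (fun p => [p.2] ++ "|---".toList ++
      PySem.Chars.join [] (toks.map (fun f => PySem.List.pyGetD f p.1 [])) ++ "|\n".toList)
  String.ofList (PySem.Chars.join [] rows ++ "     ".toList ++
    PySem.Chars.strip (PySem.Chars.join [] (toks.map (fun f => PySem.List.pyGetD f 6 []))))

-- ===== PRECONDITION & SPEC =====
def Spec_turnChordsIntoTab (chords : String) (out : String) : Prop := out = turnChordsIntoTab_alt chords
instance (chords : String) (out : String) : Decidable (Spec_turnChordsIntoTab chords out) := by unfold Spec_turnChordsIntoTab; infer_instance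

-- ===== CLAIM (what is proved, stated in full; the proofs are below) =====
def Claim_equal_turnChordsIntoTab : Prop := ∀ (chords : String), Dom_turnChordsIntoTab chords → Spec_turnChordsIntoTab chords (turnChordsIntoTab chords)

-- ===== LEMMAS AND PROOFS =====
-- what one token contributes to row i (i = 6 is the label line)
def pvFrag (i : Int) (t : List Char) : List Char :=
  ((PySem.Dict.get? pvTAB t).map (fun fs => PySem.List.pyGetD fs i [])).getD []

-- column i of the recognized chords, exactly as B joins it
def pvCol (i : Int) (ts : List (List Char)) : List Char :=
  PySem.Chars.join [] ((ts.filterMap (fun t => PySem.Dict.get? pvTAB t)).map (fun f => PySem.List.pyGetD f i []))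

theorem pvJoin_nil_cons (x : List Char) (rest : List (List Char)) :
    PySem.Chars.join [] (x :: rest) = x ++ PySem.Chars.join [] rest := by
  cases rest with
  | nil => simp [PySem.Chars.join_singleton, PySem.Chars.join_nil]
  | cons y r => rw [PySem.Chars.join_cons_cons]; simp

theorem pvCol_cons (i : Int) (t : List Char) (ts : List (List Char)) :
    pvCol i (t :: ts) = pvFrag i t ++ pvCol i ts := by
  cases h : PySem.Dict.get? pvTAB t <;>
    simp [pvCol, pvFrag, h, pvJoin_nil_cons]

theorem pvAStep_eq (st : List Char × List Char × List Char × List Char × List Char × List Char × List Char)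
    (t : List Char) :
    pvAStep st t = (st.1 ++ pvFrag 0 t, st.2.1 ++ pvFrag 1 t, st.2.2.1 ++ pvFrag 2 t,
      st.2.2.2.1 ++ pvFrag 3 t, st.2.2.2.2.1 ++ pvFrag 4 t, st.2.2.2.2.2.1 ++ pvFrag 5 t,
      st.2.2.2.2.2.2 ++ pvFrag 6 t) := by
  obtain ⟨a, b, c, d, e, f, g⟩ := st
  by_cases h1 : t = ['A', 'm']
  · subst h1; rfl
  · by_cases h2 : t = ['C']
    · subst h2; rfl
    · by_cases h3 : t = ['D']
      · subst h3; rfl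
      · by_cases h4 : t = ['G']
        · subst h4; rfl
        · have e1 : PySem.Dict.get? pvTAB t = none := by
            rw [PySem.Dict.get?_eq_none_iff_not_mem_keys]
            rw [show pvTAB.keys = [['A', 'm'], ['C'], ['D'], ['G']] from rfl]
            simp [h1, h2, h3, h4]
          simp [pvAStep, pvFrag, h1, h2, h3, h4, e1]

theorem pvAStep_loop (ts : List (List Char)) (a b c d e f g : List Char) :
    ts.foldl pvAStep (a, b, c, d, e, f, g) =
      (a ++ pvCol 0 ts, b ++ pvCol 1 ts, c ++ pvCol 2 ts, d ++ pvCol 3 ts,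
       e ++ pvCol 4 ts, f ++ pvCol 5 ts, g ++ pvCol 6 ts) := by
  induction ts generalizing a b c d e f g with
  | nil => simp [pvCol, PySem.Chars.join_nil]
  | cons t ts ih =>
    rw [List.foldl_cons, pvAStep_eq, ih]
    simp [pvCol_cons, List.append_assoc]

-- ===== VERDICT (by name: the statement is the Claim_ definition above) =====
theorem turnChordsIntoTab_spec : Claim_equal_turnChordsIntoTab := by
  intro chords _
  unfold Spec_turnChordsIntoTab turnChordsIntoTab turnChordsIntoTab_alt
  dsimp only
  rw [PySem.List.foldl_pyRange_zero_pyGetD (PySem.Chars.splitOn chords.toList " ".toList) [] pvAStep]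
  rw [pvAStep_loop]
  have henum : PySem.List.enumerate "eBGDAE".toList =
      [((0 : Int), 'e'), (1, 'B'), (2, 'G'), (3, 'D'), (4, 'A'), (5, 'E')] := rfl
  rw [henum]
  simp only [List.map_cons, List.map_nil, pvJoin_nil_cons, PySem.Chars.join_nil, pvCol]
  simp [List.append_assoc]
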